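-- pv_equiv track=rewrite | github.com/krishnamanojpvr/efs | 112-28th-Oct-PythonPrograms-Quiz/IsSubsequence.py | is_sub
-- ===== SOURCE A (Python) =====
-- def is_sub(org,sub,del_ind):
--     i,j=0,0
--     deleted = set(del_ind)
--     while i < len(org) and j<len(sub):
--         if i in deleted:
--             i+=1
--             continue
--         elif org[i]==sub[j]:
--             j+=1
--         i+=1
--     return j==len(sub)
-- ===== SOURCE B (Python) =====
-- def is_sub(org, sub, del_ind):
--     deleted = set(del_ind)
--     kept = [org[i] for i in range(len(org)) if i not in deleted]
--     it = iter(kept)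
--     return all(c in it for c in sub)
-- ===== Notes on version B (the rewrite author's own statement) =====
-- stated objective: idiomatic
-- what changed: Replaces the interleaved two-pointer skip loop by a filter pass that builds the kept characters followed by an iterator-consuming subsequence test with all(c in it for c in sub).
import Mathlib
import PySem

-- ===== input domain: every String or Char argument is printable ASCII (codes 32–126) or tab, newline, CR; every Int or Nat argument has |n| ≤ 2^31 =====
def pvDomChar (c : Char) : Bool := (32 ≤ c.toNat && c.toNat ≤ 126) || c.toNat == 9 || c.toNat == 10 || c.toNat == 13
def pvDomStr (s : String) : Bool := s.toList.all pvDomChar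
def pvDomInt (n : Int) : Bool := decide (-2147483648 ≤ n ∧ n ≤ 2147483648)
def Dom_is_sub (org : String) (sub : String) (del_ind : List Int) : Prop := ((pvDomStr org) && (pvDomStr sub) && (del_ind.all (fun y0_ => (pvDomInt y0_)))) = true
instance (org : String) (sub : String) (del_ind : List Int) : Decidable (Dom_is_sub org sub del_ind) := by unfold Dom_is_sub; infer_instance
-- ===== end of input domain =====

-- B changes the algorithm to a filter pass plus an iterator-consuming subsequence test (idiomatic; no speed claim).

-- ===== PORT A =====
-- the while loop of A: state (i, j), advancing i each iteration
def isSubLoop (org : List Char) (sub : List Char) (deleted : PySem.Set Int) (i j : Nat) : Nat :=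
  if i < org.length ∧ j < sub.length then
    if PySem.Set.contains deleted (i : Int) then
      isSubLoop org sub deleted (i + 1) j
    else if org[i]! == sub[j]! then
      isSubLoop org sub deleted (i + 1) (j + 1)
    else
      isSubLoop org sub deleted (i + 1) j
  else j
termination_by org.length - i
decreasing_by all_goals omega

def is_sub (org : String) (sub : String) (del_ind : List Int) : Bool :=
  let deleted := PySem.Set.ofList del_ind
  (isSubLoop org.toList sub.toList deleted 0 0) == sub.toList.length

-- ===== PORT B =====
-- 'c in it': consume the iterator until a match; none = exhausted without finding c
def consumeTo (c : Char) : List Char → Option (List Char)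
  | [] => none
  | x :: xs => if x == c then some xs else consumeTo c xs

-- all(c in it for c in sub) over the shared iterator
def allInIter (sub : List Char) (it : List Char) : Bool :=
  match sub with
  | [] => true
  | c :: cs =>
    match consumeTo c it with
    | none => false
    | some it' => allInIter cs it'

def is_sub_alt (org : String) (sub : String) (del_ind : List Int) : Bool :=
  let deleted := PySem.Set.ofList del_ind
  let kept := ((List.range org.toList.length).filter
      (fun (i : Nat) => !(PySem.Set.contains deleted (i : Int)))).map (fun (i : Nat) => org.toList[i]!)
  allInIter sub.toList kept

-- ===== PRECONDITION & SPEC =====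
def Spec_is_sub (org : String) (sub : String) (del_ind : List Int) (out : Bool) : Prop := out = is_sub_alt org sub del_ind
instance (org : String) (sub : String) (del_ind : List Int) (out : Bool) : Decidable (Spec_is_sub org sub del_ind out) := by unfold Spec_is_sub; infer_instance

-- ===== CLAIM (what is proved, stated in full; the proofs are below) =====
def Claim_equal_is_sub : Prop := ∀ (org : String) (sub : String) (del_ind : List Int), Dom_is_sub org sub del_ind → Spec_is_sub org sub del_ind (is_sub org sub del_ind)

-- ===== LEMMAS AND PROOFS =====

-- the kept characters from index i onwards
def keptFrom (org : List Char) (deleted : PySem.Set Int) (i : Nat) : List Char :=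
  if i < org.length then
    if PySem.Set.contains deleted (i : Int) then keptFrom org deleted (i + 1)
    else org[i]! :: keptFrom org deleted (i + 1)
  else []
termination_by org.length - i
decreasing_by all_goals omega

lemma allInIter_cons_ne (c : Char) (cs : List Char) (x : Char) (xs : List Char)
    (h : (x == c) = false) : allInIter (c :: cs) (x :: xs) = allInIter (c :: cs) xs := by
  simp [allInIter, consumeTo, h]

lemma keptFrom_eq_filterMap (org : List Char) (d : PySem.Set Int) (i : Nat) :
    keptFrom org d i =
      (((List.range' i (org.length - i)).filter
        (fun (k : Nat) => !(PySem.Set.contains d (k : Int)))).map (fun (k : Nat) => org[k]!)) := by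
  by_cases h : i < org.length
  · have hn : org.length - i = (org.length - (i + 1)) + 1 := by omega
    rw [hn, List.range'_succ]
    rw [keptFrom]
    by_cases hd : (↑i : Int) ∈ d
    · simp [h, hd, keptFrom_eq_filterMap org d (i + 1)]
    · simp [h, hd, keptFrom_eq_filterMap org d (i + 1)]
  · have hn : org.length - i = 0 := by omega
    rw [keptFrom]
    simp [h, hn]
termination_by org.length - i
decreasing_by all_goals omega

-- main loop invariant: the loop result equals sub.length iff the remaining sub is
-- a consumable subsequence of the kept characters from i onwards
lemma loop_iff (org sub : List Char) (d : PySem.Set Int) (i j : Nat) (hj : j ≤ sub.length) :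
    ((isSubLoop org sub d i j) == sub.length) = allInIter (sub.drop j) (keptFrom org d i) := by
  by_cases hjlt : j < sub.length
  · have hsj : sub[j]! = sub[j] := getElem!_pos sub j hjlt
    have hdrop : sub.drop j = sub[j]! :: sub.drop (j + 1) := by
      rw [hsj]; exact List.drop_eq_getElem_cons hjlt
    by_cases hi : i < org.length
    · rw [isSubLoop, keptFrom]
      by_cases hd : PySem.Set.contains d (i : Int)
      · simp only [hi, hjlt, and_self, if_true, hd, if_true]
        exact loop_iff org sub d (i + 1) j hj
      · simp only [hi, hjlt, and_self, if_true, hd, if_false, Bool.false_eq_true]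
        by_cases he : org[i]! == sub[j]!
        · simp only [he, if_true]
          rw [loop_iff org sub d (i + 1) (j + 1) (by omega), hdrop]
          simp only [allInIter, consumeTo, he, if_true]
        · simp only [he, if_false, Bool.false_eq_true]
          rw [loop_iff org sub d (i + 1) j hj, hdrop,
            allInIter_cons_ne _ _ _ _ (by simpa using he), ← hdrop]
    · rw [isSubLoop, keptFrom]
      simp only [hi, false_and, if_false, hdrop]
      simp only [allInIter, consumeTo]
      exact Nat.ne_of_lt hjlt |> fun h => by simp [h]
  · have hje : j = sub.length := by omega
    subst hje
    rw [isSubLoop]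
    simp [allInIter]
termination_by org.length - i
decreasing_by all_goals omega

lemma range'_zero_eq_range (n : Nat) : List.range' 0 n = List.range n := by
  simp [List.range_eq_range']

-- ===== VERDICT (by name: the statement is the Claim_ definition above) =====
theorem is_sub_spec : Claim_equal_is_sub := by
  intro org sub del_ind _
  unfold Spec_is_sub is_sub is_sub_alt
  rw [loop_iff _ _ _ _ _ (Nat.zero_le _), keptFrom_eq_filterMap]
  simp [range'_zero_eq_range]
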